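-- pv_equiv track=rewrite | github.com/marieef/master-thesis_code | experiments/further_finetuning_on_normed_neg/dataset_helpers.py | get_cue_label
-- ===== SOURCE A (Python) =====
-- def get_cue_label(sent_lines, word_idx):
--     '''
--     This version is used in NegationCueDataset.
--
--     We want to know if the word is a cue in one of the negations in the sentence,
--     and if so, what type of cue.
--     '''
--     last_idx_no_neg = 7 # constant
--     # use sent_lines[0] because each line has same lengths
--     cue_indices = [last_idx_no_neg + i*3 for i in range(len(sent_lines[0])) if last_idx_no_neg + i*3 < len(sent_lines[0])]
--
--     cue_label = "NOT_CUE" # Assuming that a cue word can only be part of ONE negation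
--     for cue_idx in cue_indices:
--         c = 0
--         for word_line in sent_lines:
--             if word_line[cue_idx] != "_" and word_line[cue_idx] != "***": # assume that _ and *** cannot be cues
--                 c+=1
--         if c > 1 and sent_lines[word_idx][cue_idx] != "***" and sent_lines[word_idx][cue_idx] != "_":
--             # There is more than 1 cue word in this negation, and this particular word is one of them
--             cue_label = "MULTI"
--         elif sent_lines[word_idx][cue_idx] == "***" or sent_lines[word_idx][cue_idx] == "_":
--             continue # The label is already set to NOT_CUE by default, and will be changed if it IS part of a cue
--         elif sent_lines[word_idx][cue_idx] == sent_lines[word_idx][3]: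
--             cue_label = "NORMAL"
--         elif sent_lines[word_idx][cue_idx] != sent_lines[word_idx][3]:
--             # Have checked that it is not a "NOT_CUE", then it must be an affix
--             cue_label = "AFFIX"
--         else:
--             continue
--
--     # IF there happens to be > 1 cue as part of the word, the last one of these will be returned
--     return cue_label
-- ===== SOURCE B (Python) =====
-- def get_cue_label(sent_lines, word_idx):
--     last_idx_no_neg = 7
--     row0 = sent_lines[0]
--     cue_indices = [last_idx_no_neg + i*3 for i in range(len(row0)) if last_idx_no_neg + i*3 < len(row0)]
--     if not cue_indices:
--         return "NOT_CUE"
--     row = sent_lines[word_idx]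
--     # last cue column where this word's entry is a cue wins
--     for cue_idx in reversed(cue_indices):
--         entry = row[cue_idx]
--         if entry != "_" and entry != "***":
--             c = sum(1 for line in sent_lines if line[cue_idx] != "_" and line[cue_idx] != "***")
--             if c > 1:
--                 return "MULTI"
--             return "NORMAL" if entry == row[3] else "AFFIX"
--     return "NOT_CUE"
-- ===== Notes on version B (the rewrite author's own statement) =====
-- stated objective: simpler
-- what changed: A counts cue words in every cue column and overwrites a label variable column after column; B scans the cue columns backwards for the last column where this word is a cue, returns early, and counts the cues of that single column once.
import Mathlib
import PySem

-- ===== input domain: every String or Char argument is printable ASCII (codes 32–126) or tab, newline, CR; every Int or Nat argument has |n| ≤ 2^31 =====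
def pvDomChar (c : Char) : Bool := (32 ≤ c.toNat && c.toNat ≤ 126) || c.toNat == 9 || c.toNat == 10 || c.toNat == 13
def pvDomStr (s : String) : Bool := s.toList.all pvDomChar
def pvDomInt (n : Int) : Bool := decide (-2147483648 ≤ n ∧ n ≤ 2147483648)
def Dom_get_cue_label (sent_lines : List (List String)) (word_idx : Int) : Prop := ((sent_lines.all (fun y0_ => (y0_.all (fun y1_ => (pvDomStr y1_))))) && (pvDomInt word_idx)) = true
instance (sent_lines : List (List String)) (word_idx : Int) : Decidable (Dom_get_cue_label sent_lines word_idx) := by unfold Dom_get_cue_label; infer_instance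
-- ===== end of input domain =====

-- B replaces A's count-every-cue-column-and-overwrite nested loop by a backwards scan that
-- finds the last cue column of the word and counts cues in that single column once (simpler).


-- ===== PORT A =====
def get_cue_label (sent_lines : List (List String)) (word_idx : Int) : String :=
  let row0 := PySem.List.pyGetD sent_lines 0 []          -- sent_lines[0]; Pre_ excludes the IndexError
  let cue_indices := ((List.range row0.length).filter (fun i => 7 + i * 3 < row0.length)).map
      (fun i => 7 + i * 3)
  let row := PySem.List.pyGetD sent_lines word_idx []    -- sent_lines[word_idx]; Pre_ excludes the IndexError
  cue_indices.foldl (fun cue_label cue_idx =>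
    let c : Nat := sent_lines.foldl (fun (c : Nat) word_line =>
      if word_line.getD cue_idx "" ≠ "_" ∧ word_line.getD cue_idx "" ≠ "***" then c + 1 else c) 0
    if c > 1 ∧ row.getD cue_idx "" ≠ "***" ∧ row.getD cue_idx "" ≠ "_" then "MULTI"
    else if row.getD cue_idx "" = "***" ∨ row.getD cue_idx "" = "_" then cue_label
    else if row.getD cue_idx "" = row.getD 3 "" then "NORMAL"
    else if row.getD cue_idx "" ≠ row.getD 3 "" then "AFFIX"
    else cue_label) "NOT_CUE"

-- ===== PORT B =====
def get_cue_label_alt (sent_lines : List (List String)) (word_idx : Int) : String :=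
  let row0 := PySem.List.pyGetD sent_lines 0 []
  let cue_indices := ((List.range row0.length).filter (fun i => 7 + i * 3 < row0.length)).map
      (fun i => 7 + i * 3)
  if cue_indices = [] then "NOT_CUE" else
  let row := PySem.List.pyGetD sent_lines word_idx []
  match cue_indices.reverse.find? (fun cue_idx =>
      decide (row.getD cue_idx "" ≠ "_" ∧ row.getD cue_idx "" ≠ "***")) with
  | none => "NOT_CUE"
  | some cue_idx =>
    let c := sent_lines.countP (fun line =>
      decide (line.getD cue_idx "" ≠ "_" ∧ line.getD cue_idx "" ≠ "***"))
    if c > 1 then "MULTI"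
    else if row.getD cue_idx "" = row.getD 3 "" then "NORMAL" else "AFFIX"

-- ===== PRECONDITION & SPEC =====
-- Exactly where Python A returns normally: a first line to read the column layout from; and when
-- there is at least one cue column (first line longer than 7), word_idx must be a valid (possibly
-- negative) row index and every cue column must be present in every line.
def Pre_get_cue_label (sent_lines : List (List String)) (word_idx : Int) : Prop :=
  sent_lines ≠ [] ∧
    (7 < (sent_lines.headD []).length → PySem.Raise.InRange sent_lines.length word_idx) ∧
    ∀ l ∈ sent_lines, ∀ i, i < (sent_lines.headD []).length →
      7 + i * 3 < (sent_lines.headD []).length → 7 + i * 3 < l.length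
instance (sent_lines : List (List String)) (word_idx : Int) : Decidable (Pre_get_cue_label sent_lines word_idx) := by unfold Pre_get_cue_label; infer_instance

def pvWitness_get_cue_label : List (List String) × Int :=
  ([["1", "ch1", "0", "not", "not", "_", "_", "not", "_", "_"],
    ["1", "ch1", "1", "good", "good", "_", "_", "_", "good", "_"]], 0)

def Spec_get_cue_label (sent_lines : List (List String)) (word_idx : Int) (out : String) : Prop := out = get_cue_label_alt sent_lines word_idx
instance (sent_lines : List (List String)) (word_idx : Int) (out : String) : Decidable (Spec_get_cue_label sent_lines word_idx out) := by unfold Spec_get_cue_label; infer_instance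

-- ===== CLAIM (what is proved, stated in full; the proofs are below) =====
def Claim_equal_get_cue_label : Prop := ∀ (sent_lines : List (List String)) (word_idx : Int), Dom_get_cue_label sent_lines word_idx → Pre_get_cue_label sent_lines word_idx → Spec_get_cue_label sent_lines word_idx (get_cue_label sent_lines word_idx)

-- ===== LEMMAS AND PROOFS =====

/-- A "last write wins" fold whose write does not depend on the accumulator is the value at the
last element satisfying the guard (found by scanning the reverse). -/
theorem foldl_guard_lastwins {α β : Type} (p : α → Bool) (f : α → β) (l : List α) (init : β) :
    l.foldl (fun acc a => if p a then f a else acc) init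
      = (match l.reverse.find? p with | some a => f a | none => init) := by
  induction l generalizing init with
  | nil => simp
  | cons a t ih =>
    simp only [List.foldl_cons, ih, List.reverse_cons, List.find?_append]
    cases h : t.reverse.find? p with
    | some b => simp
    | none =>
      simp only [Option.none_or]
      by_cases hp : p a = true <;> simp [List.find?, hp]

/-- A counting fold is `countP`. -/
theorem foldl_count_eq_countP {α : Type} (p : α → Prop) [DecidablePred p] (l : List α) :
    l.foldl (fun c x => if p x then c + 1 else c) 0 = l.countP (fun x => decide (p x)) := by
  suffices h : ∀ n : Nat, l.foldl (fun c x => if p x then c + 1 else c) n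
      = n + l.countP (fun x => decide (p x)) by
    simpa using h 0
  induction l with
  | nil => simp
  | cons a t ih =>
    intro n
    by_cases hp : p a
    · simp [hp, ih]; omega
    · simp [hp, ih]

theorem get_cue_label_spec : Claim_equal_get_cue_label := by
  intro sent_lines word_idx _hdom _hpre
  unfold Spec_get_cue_label get_cue_label get_cue_label_alt
  simp only
  set row := PySem.List.pyGetD sent_lines word_idx [] with hrow
  set L := (PySem.List.pyGetD sent_lines 0 []).length with hL
  set idxs := ((List.range L).filter (fun i => 7 + i * 3 < L)).map (fun i => 7 + i * 3) with hidxs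
  have h1 : idxs.foldl (fun cue_label cue_idx =>
      let c : Nat := sent_lines.foldl (fun (c : Nat) word_line =>
        if word_line.getD cue_idx "" ≠ "_" ∧ word_line.getD cue_idx "" ≠ "***" then c + 1 else c) 0
      if c > 1 ∧ row.getD cue_idx "" ≠ "***" ∧ row.getD cue_idx "" ≠ "_" then "MULTI"
      else if row.getD cue_idx "" = "***" ∨ row.getD cue_idx "" = "_" then cue_label
      else if row.getD cue_idx "" = row.getD 3 "" then "NORMAL"
      else if row.getD cue_idx "" ≠ row.getD 3 "" then "AFFIX"
      else cue_label) "NOT_CUE"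
      = idxs.foldl (fun acc cue_idx =>
          if (decide (row.getD cue_idx "" ≠ "_" ∧ row.getD cue_idx "" ≠ "***")) then
            (if sent_lines.countP (fun line =>
                decide (line.getD cue_idx "" ≠ "_" ∧ line.getD cue_idx "" ≠ "***")) > 1 then "MULTI"
             else if row.getD cue_idx "" = row.getD 3 "" then "NORMAL" else "AFFIX")
          else acc) "NOT_CUE" := by
    apply List.foldl_ext
    intro acc cue_idx _
    simp only
    rw [foldl_count_eq_countP (fun (word_line : List String) =>
          word_line.getD cue_idx "" ≠ "_" ∧ word_line.getD cue_idx "" ≠ "***")]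
    generalize row.getD cue_idx "" = e
    generalize row.getD 3 "" = e3
    by_cases hu : e = "_" <;> by_cases hs : e = "***" <;> by_cases he : e = e3 <;>
      simp_all
  rw [h1, foldl_guard_lastwins]
  by_cases hnil : idxs = []
  · simp [hnil]
  · simp only [if_neg hnil]
    cases List.find? (fun cue_idx =>
        decide (row.getD cue_idx "" ≠ "_" ∧ row.getD cue_idx "" ≠ "***")) idxs.reverse <;> rfl
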